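-- pv_equiv track=rewrite | github.com/paiml/depyler | examples/hard_clustering_1d.py | cluster_inertia
-- ===== SOURCE A (Python) =====
-- def abs_val(x: int) -> int:
--     if x < 0:
--         return -x
--     return x
--
-- def assign_clusters(data: list[int], centroids: list[int]) -> list[int]:
--     # Assign each data point to nearest centroid
--     assignments: list[int] = []
--     i: int = 0
--     while i < len(data):
--         best_cluster: int = 0
--         best_dist: int = abs_val(data[i] - centroids[0])
--         j: int = 1
--         while j < len(centroids):
--             dist: int = abs_val(data[i] - centroids[j])
--             if dist < best_dist:
--                 best_dist = dist
--                 best_cluster = j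
--             j = j + 1
--         assignments.append(best_cluster)
--         i = i + 1
--     return assignments
--
-- def cluster_inertia(data: list[int], centroids: list[int]) -> int:
--     # Sum of squared distances to nearest centroid
--     assignments: list[int] = assign_clusters(data, centroids)
--     total: int = 0
--     i: int = 0
--     while i < len(data):
--         diff: int = data[i] - centroids[assignments[i]]
--         total = total + diff * diff
--         i = i + 1
--     return total
-- ===== SOURCE B (Python) =====
-- def cluster_inertia(data: list[int], centroids: list[int]) -> int:
--     # Sort centroids once; for each point, binary-search the insertion
--     # point and compare only the two neighbouring centroids.
--     cs = sorted(centroids)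
--     n = len(cs)
--     total = 0
--     for x in data:
--         lo = 0
--         hi = n
--         while lo < hi:
--             mid = (lo + hi) // 2
--             if cs[mid] < x:
--                 lo = mid + 1
--             else:
--                 hi = mid
--         best = None
--         if lo < n:
--             best = x - cs[lo]
--         if lo > 0:
--             d = x - cs[lo - 1]
--             if best is None or d * d < best * best:
--                 best = d
--         total = total + best * best
--     return total
-- ===== Notes on version B (the rewrite author's own statement) =====
-- stated objective: faster
-- what changed: B sorts the centroids once and binary-searches the insertion point for each data point, comparing only the two neighbouring centroids, instead of A's per-point linear argmin scan plus a second indexing pass.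
import Mathlib
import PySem

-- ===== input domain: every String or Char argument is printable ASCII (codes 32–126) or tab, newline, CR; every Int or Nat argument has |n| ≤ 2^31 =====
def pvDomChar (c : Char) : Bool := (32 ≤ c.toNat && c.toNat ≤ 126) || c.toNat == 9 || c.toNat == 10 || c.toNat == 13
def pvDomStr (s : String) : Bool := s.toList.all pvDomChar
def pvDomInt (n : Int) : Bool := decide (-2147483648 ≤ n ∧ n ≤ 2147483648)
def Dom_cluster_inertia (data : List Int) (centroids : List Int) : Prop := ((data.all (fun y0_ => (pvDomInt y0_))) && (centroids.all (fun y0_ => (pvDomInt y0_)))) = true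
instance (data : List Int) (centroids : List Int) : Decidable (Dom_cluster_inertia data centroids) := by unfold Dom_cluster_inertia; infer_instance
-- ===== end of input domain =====

-- B sorts the centroids once and binary-searches each point's insertion position,
-- comparing only the two neighbouring centroids (faster: O((n+k) log k) vs A's O(n*k)).


-- ===== PORT A =====
def absVal (x : Int) : Int := if x < 0 then -x else x

-- inner 'while j < len(centroids)' of assign_clusters: scan the suffix from index j,
-- carrying (best_cluster, best_dist)
def acGo (x : Int) : List Int → Nat → Nat → Int → Nat × Int
  | [], _, bc, bd => (bc, bd)
  | c :: rest, j, bc, bd =>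
    let d := absVal (x - c)
    if d < bd then acGo x rest (j + 1) j d else acGo x rest (j + 1) bc bd

def assignClusters (data : List Int) (centroids : List Int) : List Int :=
  match centroids with
  | [] => []      -- Python raises IndexError here when data ≠ []; excluded by Pre_
  | c0 :: rest => data.map (fun x => ((acGo x rest 1 0 (absVal (x - c0))).1 : Int))

-- second while loop of cluster_inertia: walk data and assignments in parallel
def ciGo (centroids : List Int) : List Int → List Int → Int → Int
  | [], _, t => t
  | x :: xs, a :: as_, t =>
      let diff := x - centroids.getD a.toNat 0   -- assignments are always in range under Pre_
      ciGo centroids xs as_ (t + diff * diff)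
  | _ :: _, [], t => t                            -- unreachable: assignments has data's length

def cluster_inertia (data : List Int) (centroids : List Int) : Int :=
  ciGo centroids data (assignClusters data centroids) 0

-- ===== PORT B =====
-- hand-written bisect_left loop of Source B: 'while lo < hi: mid = (lo+hi)//2; …'
def bisGo (cs : List Int) (x : Int) (lo hi : Nat) : Nat :=
  if lo < hi then
    let mid := (lo + hi) / 2
    if cs.getD mid 0 < x then bisGo cs x (mid + 1) hi else bisGo cs x lo mid
  else lo
termination_by hi - lo
decreasing_by all_goals omega

-- the per-point body of Source B's loop: insertion point, then the two neighbour candidates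
def bBest (x : Int) (cs : List Int) : Option Int :=
  let n := cs.length
  let lo := bisGo cs x 0 n
  let best0 : Option Int := if lo < n then some (x - cs.getD lo 0) else none
  if 0 < lo then
    let d := x - cs.getD (lo - 1) 0
    match best0 with
    | none => some d
    | some b => if d * d < b * b then some d else some b
  else best0

def cluster_inertia_alt (data : List Int) (centroids : List Int) : Int :=
  let cs := PySem.List.sorted centroids (fun c => c)
  data.foldl (fun total x =>
    let b := (bBest x cs).getD 0   -- 'best' is None only for empty centroids; excluded by Pre_ unless data = []
    total + b * b) 0

-- ===== PRECONDITION & SPEC =====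
-- Pre_ excludes exactly the inputs where A raises IndexError: empty centroids with nonempty data.
def Pre_cluster_inertia (data : List Int) (centroids : List Int) : Prop :=
  centroids ≠ [] ∨ data = []
instance (data : List Int) (centroids : List Int) : Decidable (Pre_cluster_inertia data centroids) := by
  unfold Pre_cluster_inertia; infer_instance

def pvWitness_cluster_inertia : List Int × List Int := ([1, 5, -3], [2, 7])

def Spec_cluster_inertia (data : List Int) (centroids : List Int) (out : Int) : Prop := out = cluster_inertia_alt data centroids
instance (data : List Int) (centroids : List Int) (out : Int) : Decidable (Spec_cluster_inertia data centroids out) := by unfold Spec_cluster_inertia; infer_instance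

-- ===== CLAIM (what is proved, stated in full; the proofs are below) =====
def Claim_equal_cluster_inertia : Prop := ∀ (data : List Int) (centroids : List Int), Dom_cluster_inertia data centroids → Pre_cluster_inertia data centroids → Spec_cluster_inertia data centroids (cluster_inertia data centroids)

-- ===== LEMMAS AND PROOFS =====

theorem absVal_nonneg (t : Int) : 0 ≤ absVal t := by
  unfold absVal; split <;> omega

theorem absVal_sq (t : Int) : absVal t * absVal t = t * t := by
  unfold absVal; split <;> ring

-- the inner-loop distance is the running minimum of the scanned distances
theorem acGo_snd (x : Int) (rest : List Int) : ∀ (j bc : Nat) (bd : Int),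
    (acGo x rest j bc bd).2 = (rest.map (fun c => absVal (x - c))).foldl min bd := by
  induction rest with
  | nil => intro j bc bd; simp [acGo]
  | cons c rest ih =>
    intro j bc bd
    simp only [acGo, List.map_cons, List.foldl_cons]
    split
    · rw [ih]; congr 1; omega
    · rw [ih]; congr 1; omega

-- the inner loop's best index points at an element realising its best distance
theorem acGo_fst (x : Int) (cs : List Int) : ∀ (rest : List Int) (j bc : Nat) (bd : Int),
    rest = cs.drop j → bc < cs.length → absVal (x - cs.getD bc 0) = bd →
    (acGo x rest j bc bd).1 < cs.length ∧
      absVal (x - cs.getD (acGo x rest j bc bd).1 0) = (acGo x rest j bc bd).2 := by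
  intro rest
  induction rest with
  | nil => intro j bc bd _ hbc hbd; simpa [acGo] using ⟨hbc, hbd⟩
  | cons c rest ih =>
    intro j bc bd hrest hbc hbd
    have hj : j < cs.length := by
      by_contra h
      rw [List.drop_eq_nil_of_le (by omega)] at hrest
      exact List.cons_ne_nil _ _ hrest
    have hc : cs.getD j 0 = c := by
      have h1 : (List.drop j cs).head? = cs[j]? := List.head?_drop
      rw [← hrest] at h1
      simp at h1
      simp [List.getD, ← h1]
    have htail : rest = cs.drop (j + 1) := by
      have h2 : (cs.drop j).tail = cs.drop (j + 1) := by
        rw [← List.drop_drop]; simp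
      rw [← hrest] at h2
      simpa using h2
    simp only [acGo]
    split
    · exact ih (j + 1) j _ htail hj (by rw [hc])
    · exact ih (j + 1) bc bd htail hbc hbd

-- uniqueness of the minimum value
theorem min_unique {S : List Int} {a b : Int} (ha : a ∈ S) (hb : b ∈ S)
    (hla : ∀ y ∈ S, a ≤ y) (hlb : ∀ y ∈ S, b ≤ y) : a = b :=
  le_antisymm (hla b hb) (hlb a ha)

theorem sq_le_sq_of_nonneg_le {a b : Int} (ha : 0 ≤ a) (h : a ≤ b) : a * a ≤ b * b :=
  mul_le_mul h h ha (le_trans ha h)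

theorem sq_le_sq_of_nonpos_le {a b : Int} (hb : b ≤ 0) (h : a ≤ b) : b * b ≤ a * a := by
  nlinarith

-- A's per-point squared distance: a member of the squares and a lower bound of them
theorem A_point (x c0 : Int) (rest : List Int) :
    (∃ v ∈ (c0 :: rest), (x - (c0 :: rest).getD (acGo x rest 1 0 (absVal (x - c0))).1 0) *
        (x - (c0 :: rest).getD (acGo x rest 1 0 (absVal (x - c0))).1 0) = (x - v) * (x - v)) ∧
    (∀ c ∈ (c0 :: rest),
      (x - (c0 :: rest).getD (acGo x rest 1 0 (absVal (x - c0))).1 0) *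
        (x - (c0 :: rest).getD (acGo x rest 1 0 (absVal (x - c0))).1 0) ≤ (x - c) * (x - c)) := by
  obtain ⟨hlt, heq⟩ := acGo_fst x (c0 :: rest) rest 1 0 (absVal (x - c0))
    (by simp) (by simp) (by simp [List.getD])
  have hsnd := acGo_snd x rest 1 0 (absVal (x - c0))
  have hmin := PySem.List.foldl_min_le (rest.map (fun c => absVal (x - c))) (absVal (x - c0))
  set r := acGo x rest 1 0 (absVal (x - c0)) with hr
  set v := (c0 :: rest).getD r.1 0 with hv
  have hvmem : v ∈ (c0 :: rest) := by
    rw [hv, List.getD_eq_getElem _ _ hlt]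
    exact List.getElem_mem hlt
  have hsq : (x - v) * (x - v) = r.2 * r.2 := by rw [← heq, absVal_sq]
  have hlb : ∀ c ∈ (c0 :: rest), r.2 ≤ absVal (x - c) := by
    intro c hc
    rcases List.mem_cons.mp hc with h | h
    · subst h; rw [hsnd]; exact hmin.1
    · rw [hsnd]; exact hmin.2 _ (List.mem_map_of_mem h)
  have hnn : 0 ≤ r.2 := heq ▸ absVal_nonneg _
  refine ⟨⟨v, hvmem, rfl⟩, ?_⟩
  intro c hc
  calc (x - v) * (x - v) = r.2 * r.2 := hsq
    _ ≤ absVal (x - c) * absVal (x - c) := sq_le_sq_of_nonneg_le hnn (hlb c hc)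
    _ = (x - c) * (x - c) := absVal_sq _

-- binary-search invariant: bisGo returns the first index whose element is ≥ x
theorem bisGo_spec (cs : List Int) (x : Int) (hs : cs.Pairwise (· ≤ ·)) :
    ∀ (lo hi : Nat), lo ≤ hi → hi ≤ cs.length →
    (∀ i, i < lo → ∀ h : i < cs.length, cs[i] < x) →
    (∀ i, hi ≤ i → ∀ h : i < cs.length, x ≤ cs[i]) →
    (lo ≤ bisGo cs x lo hi ∧ bisGo cs x lo hi ≤ hi) ∧
      (∀ i (h : i < cs.length), i < bisGo cs x lo hi → cs[i] < x) ∧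
      (∀ i (h : i < cs.length), bisGo cs x lo hi ≤ i → x ≤ cs[i]) := by
  have hmono : ∀ (i j : Nat) (hj : j < cs.length) (hij : i ≤ j), cs[i]'(by omega) ≤ cs[j] := by
    intro i j hj hij
    rcases Nat.lt_or_ge i j with h | h
    · exact (List.pairwise_iff_getElem.mp hs) i j (by omega) hj h
    · have hij' : i = j := by omega
      subst hij'; exact le_refl _
  intro lo hi
  fun_induction bisGo cs x lo hi with
  | case1 lo hi hlh mid hcmp ih =>
    intro _ hhi hlow hhigh
    have hmeq : mid = (lo + hi) / 2 := rfl
    have hmhi : mid < hi := by omega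
    have hmlen : mid < cs.length := by omega
    have hmx : cs[mid] < x := by
      rwa [List.getD_eq_getElem _ _ hmlen] at hcmp
    have hrec := ih (by omega) hhi
      (by
        intro i hi' h
        exact lt_of_le_of_lt (hmono i mid hmlen (by omega)) hmx)
      hhigh
    exact ⟨⟨by omega, hrec.1.2⟩, hrec.2⟩
  | case2 lo hi hlh mid hcmp ih =>
    intro _ hhi hlow hhigh
    have hmeq : mid = (lo + hi) / 2 := rfl
    have hmlo : lo ≤ mid := by omega
    have hmhi : mid < hi := by omega
    have hmlen : mid < cs.length := by omega
    have hmx : x ≤ cs[mid] := by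
      rw [List.getD_eq_getElem _ _ hmlen] at hcmp
      omega
    have hrec := ih hmlo (by omega) hlow
      (by
        intro i hi' h
        exact le_trans hmx (hmono mid i h hi'))
    exact ⟨⟨hrec.1.1, by omega⟩, hrec.2⟩
  | case3 lo hi hlh =>
    intro hle _ hlow hhigh
    have hlohi : lo = hi := by omega
    subst hlohi
    exact ⟨⟨le_refl _, le_refl _⟩, fun i h hi' => hlow i hi' h, fun i h hi' => hhigh i hi' h⟩

-- B's per-point chosen diff: built from a centroid, and its square a lower bound of the squares
theorem B_point (x : Int) (cs : List Int) (hne : cs ≠ []) (hpw : cs.Pairwise (· ≤ ·)) :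
    (∃ v ∈ cs, (bBest x cs).getD 0 = x - v) ∧
    (∀ c ∈ cs, (bBest x cs).getD 0 * (bBest x cs).getD 0 ≤ (x - c) * (x - c)) := by
  have hn : 0 < cs.length := List.length_pos_of_ne_nil hne
  obtain ⟨⟨-, hrle⟩, hlow, hhigh⟩ := bisGo_spec cs x hpw 0 cs.length (by omega) (le_refl _)
    (by intro i h _; omega) (by intro i h h2; omega)
  set r := bisGo cs x 0 cs.length with hr
  have hmono : ∀ (i j : Nat) (hj : j < cs.length) (hij : i ≤ j), cs[i]'(by omega) ≤ cs[j] := by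
    intro i j hj hij
    rcases Nat.lt_or_ge i j with h | h
    · exact (List.pairwise_iff_getElem.mp hpw) i j (by omega) hj h
    · have hij' : i = j := by omega
      subst hij'; exact le_refl _
  have hgd : ∀ (i : Nat) (h : i < cs.length), cs.getD i 0 = cs[i] :=
    fun i h => List.getD_eq_getElem cs 0 h
  rcases Nat.eq_zero_or_pos r with hr0 | hrpos
  · -- insertion point 0: only the right neighbour exists
    have hrl : r < cs.length := by omega
    have hb : (bBest x cs).getD 0 = x - cs[r] := by
      simp only [bBest]
      rw [← hr, if_neg (by omega : ¬ 0 < r), if_pos hrl]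
      rw [hgd r hrl]
      simp
    have hnp : x - cs[r] ≤ 0 := by
      have := hhigh r hrl (le_refl _); omega
    refine ⟨⟨cs[r], List.getElem_mem hrl, hb⟩, ?_⟩
    intro c hc
    obtain ⟨i, hi, rfl⟩ := List.mem_iff_getElem.mp hc
    rw [hb]
    exact sq_le_sq_of_nonpos_le hnp (by have := hmono r i hi (by omega); omega)
  · rcases Nat.lt_or_ge r cs.length with hrl | hrge
    · -- both neighbours exist: take the smaller square
      have hL : r - 1 < cs.length := by omega
      have hb : (bBest x cs).getD 0 =
          if (x - cs[r - 1]'hL) * (x - cs[r - 1]'hL) < (x - cs[r]) * (x - cs[r])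
          then x - cs[r - 1]'hL else x - cs[r] := by
        simp only [bBest]
        rw [← hr, if_pos hrpos, if_pos hrl]
        rw [hgd r hrl, hgd (r - 1) hL]
        split_ifs with h <;> simp [h]
      have hdnn : 0 ≤ x - cs[r - 1]'hL := by
        have := hlow (r - 1) hL (by omega); omega
      have hbnp : x - cs[r] ≤ 0 := by
        have := hhigh r hrl (le_refl _); omega
      constructor
      · rw [hb]
        split
        · exact ⟨cs[r - 1]'hL, List.getElem_mem hL, rfl⟩
        · exact ⟨cs[r], List.getElem_mem hrl, rfl⟩
      · intro c hc
        obtain ⟨i, hi, rfl⟩ := List.mem_iff_getElem.mp hc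
        have hled : (bBest x cs).getD 0 * (bBest x cs).getD 0 ≤
            (x - cs[r - 1]'hL) * (x - cs[r - 1]'hL) := by
          rw [hb]; split
          · exact le_refl _
          · linarith [not_lt.mp (by assumption : ¬ (x - cs[r - 1]'hL) * (x - cs[r - 1]'hL) <
              (x - cs[r]) * (x - cs[r]))]
        have hleb : (bBest x cs).getD 0 * (bBest x cs).getD 0 ≤ (x - cs[r]) * (x - cs[r]) := by
          rw [hb]; split
          · linarith [lt_of_lt_of_le (by assumption : (x - cs[r - 1]'hL) * (x - cs[r - 1]'hL) <
              (x - cs[r]) * (x - cs[r])) (le_refl _)]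
          · exact le_refl _
        rcases Nat.lt_or_ge i r with h | h
        · refine le_trans hled (sq_le_sq_of_nonneg_le hdnn ?_)
          have := hmono i (r - 1) hL (by omega); omega
        · refine le_trans hleb (sq_le_sq_of_nonpos_le hbnp ?_)
          have := hmono r i hi (by omega); omega
    · -- insertion point n: only the left neighbour exists
      have hrn : r = cs.length := by omega
      have hL : r - 1 < cs.length := by omega
      have hb : (bBest x cs).getD 0 = x - cs[r - 1]'hL := by
        simp only [bBest]
        rw [← hr, if_pos hrpos, if_neg (by omega : ¬ r < cs.length)]
        rw [hgd (r - 1) hL]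
        simp
      have hdnn : 0 ≤ x - cs[r - 1]'hL := by
        have := hlow (r - 1) hL (by omega); omega
      refine ⟨⟨cs[r - 1]'hL, List.getElem_mem hL, hb⟩, ?_⟩
      intro c hc
      obtain ⟨i, hi, rfl⟩ := List.mem_iff_getElem.mp hc
      rw [hb]
      exact sq_le_sq_of_nonneg_le hdnn (by have := hmono i (r - 1) hL (by omega); omega)

-- ciGo over data with its assignments list is a fold of per-point contributions
theorem ciGo_map (cs : List Int) (f : Int → Nat) : ∀ (xs : List Int) (t : Int),
    ciGo cs xs (xs.map (fun x => (f x : Int))) t =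
      xs.foldl (fun t x => t + (x - cs.getD (f x) 0) * (x - cs.getD (f x) 0)) t := by
  intro xs
  induction xs with
  | nil => intro t; simp [ciGo]
  | cons x xs ih => intro t; simp [ciGo, ih]

-- ===== VERDICT (by name: the statement is the Claim_ definition above) =====
theorem cluster_inertia_spec : Claim_equal_cluster_inertia := by
  intro data centroids _ hpre
  unfold Spec_cluster_inertia
  cases centroids with
  | nil =>
    have hd : data = [] := by
      rcases hpre with h | h
      · exact absurd rfl h
      · exact h
    subst hd
    rfl
  | cons c0 rest =>
    have hperm : (PySem.List.sorted (c0 :: rest) (fun c => c)).Perm (c0 :: rest) :=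
      PySem.List.sorted_perm (c0 :: rest) (fun c => c) false
    have hpw : (PySem.List.sorted (c0 :: rest) (fun c => c)).Pairwise (· ≤ ·) := by
      simpa using PySem.List.sorted_pairwise (c0 :: rest) (fun c => c)
    have hne' : PySem.List.sorted (c0 :: rest) (fun c => c) ≠ [] := by
      intro h
      have hlen := hperm.length_eq
      rw [h] at hlen
      simp at hlen
    have hA : cluster_inertia data (c0 :: rest) =
        ciGo (c0 :: rest) data
          (data.map (fun x => (((acGo x rest 1 0 (absVal (x - c0))).1 : Nat) : Int))) 0 := rfl
    have hB : cluster_inertia_alt data (c0 :: rest) =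
        data.foldl (fun total x =>
          total + (bBest x (PySem.List.sorted (c0 :: rest) (fun c => c))).getD 0 *
            (bBest x (PySem.List.sorted (c0 :: rest) (fun c => c))).getD 0) 0 := rfl
    rw [hA, hB, ciGo_map (c0 :: rest) (fun x => (acGo x rest 1 0 (absVal (x - c0))).1) data 0]
    have hfun : (fun (t : Int) (x : Int) =>
          t + (bBest x (PySem.List.sorted (c0 :: rest) (fun c => c))).getD 0 *
            (bBest x (PySem.List.sorted (c0 :: rest) (fun c => c))).getD 0)
        = (fun (t : Int) (x : Int) =>
          t + (x - (c0 :: rest).getD (acGo x rest 1 0 (absVal (x - c0))).1 0) *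
            (x - (c0 :: rest).getD (acGo x rest 1 0 (absVal (x - c0))).1 0)) := by
      funext t x
      obtain ⟨⟨va, hva, hva2⟩, hAlb⟩ := A_point x c0 rest
      obtain ⟨⟨vb, hvb, hvb2⟩, hBlb⟩ := B_point x (PySem.List.sorted (c0 :: rest) (fun c => c))
        hne' hpw
      have hkey : (x - (c0 :: rest).getD (acGo x rest 1 0 (absVal (x - c0))).1 0) *
            (x - (c0 :: rest).getD (acGo x rest 1 0 (absVal (x - c0))).1 0) =
          (bBest x (PySem.List.sorted (c0 :: rest) (fun c => c))).getD 0 *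
            (bBest x (PySem.List.sorted (c0 :: rest) (fun c => c))).getD 0 := by
        refine min_unique (S := (c0 :: rest).map (fun c => (x - c) * (x - c))) ?_ ?_ ?_ ?_
        · exact hva2 ▸ List.mem_map_of_mem hva
        · rw [hvb2]
          exact List.mem_map_of_mem (hperm.mem_iff.mp hvb)
        · intro y hy
          obtain ⟨c, hc, rfl⟩ := List.mem_map.mp hy
          exact hAlb c hc
        · intro y hy
          obtain ⟨c, hc, rfl⟩ := List.mem_map.mp hy
          exact hBlb c (hperm.mem_iff.mpr hc)
      rw [hkey]
    rw [hfun]
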